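-- pv_equiv track=rewrite | github.com/Cohen-14/Tic-Tac-Toe | jogo_do_galo(1.2).py | obter_posicoes_livres
-- ===== SOURCE A (Python) =====
-- def eh_tabuleiro(tab):
--     """Confere se o argumento representa um tabuleiro de jogo"""
--     i = 0
--     if isinstance(tab, tuple) and len(tab) == 3:
--         x, y, z = tab[0], tab[1], tab[2]
--         if len(x) == 3 and len(y) == 3 and len(z) == 3:
--             while 0 <= i < 3:
--                 if isinstance(x[i], int) and isinstance(y[i], int) and isinstance(z[i], int):
--                     if not isinstance(x[i], bool) and not isinstance(y[i], bool) and not isinstance(z[i], bool):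
--                         if -1 > x[i] > 1 and -1 > y[i] > 1 and -1 > z[i] > 1:
--                             return False
--                         else:
--                             i = i + 1
--                     else:
--                         return False
--                 else:
--                     return False
--             else:
--                 return True
--         else:
--             return False
--     return False
--
-- def obter_posicoes_livres(tab):
--     """ mostra todas as posicoes que estao livres no tabuleiro"""
--     if eh_tabuleiro(tab):
--         i = 0
--         res = ()
--         x, y, z = tab[0], tab[1], tab[2]
--         while 0 <= i <= 2:
--             if x[i] == 0:
--                 res = res + (i + 1,)
--                 i = i + 1
--             else:
--                 i = i + 1
--         while 3 <= i <= 5: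
--             if y[i - 3] == 0:
--                 res = res + (i + 1,)
--                 i = i + 1
--             else:
--                 i = i + 1
--         while 6 <= i <= 8:
--             if z[i - 6] == 0:
--                 res = res + (i + 1,)
--                 i = i + 1
--             else:
--                 i = i + 1
--         return res
--     raise ValueError('obter_posicoes_livres: o argumento e invalido')
-- ===== SOURCE B (Python) =====
-- def obter_posicoes_livres(tab):
--     """ mostra todas as posicoes que estao livres no tabuleiro"""
--     if not (isinstance(tab, tuple) and len(tab) == 3
--             and all(len(r) == 3 and all(type(v) is int for v in r) for r in tab)):
--         raise ValueError('obter_posicoes_livres: o argumento e invalido')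
--
--     def livres(n):
--         if n > 9:
--             return ()
--         rest = livres(n + 1)
--         if tab[(n - 1) // 3][(n - 1) % 3] == 0:
--             return (n,) + rest
--         return rest
--
--     return livres(1)
-- ===== Notes on version B (the rewrite author's own statement) =====
-- stated objective: simpler
-- what changed: B replaces A's eh_tabuleiro guard and three sequential forward while loops by a flat all()-based validation plus one recursive pass that builds the result back-to-front by cons, addressing cell n via (n-1)//3 and (n-1)%3.
import Mathlib
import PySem

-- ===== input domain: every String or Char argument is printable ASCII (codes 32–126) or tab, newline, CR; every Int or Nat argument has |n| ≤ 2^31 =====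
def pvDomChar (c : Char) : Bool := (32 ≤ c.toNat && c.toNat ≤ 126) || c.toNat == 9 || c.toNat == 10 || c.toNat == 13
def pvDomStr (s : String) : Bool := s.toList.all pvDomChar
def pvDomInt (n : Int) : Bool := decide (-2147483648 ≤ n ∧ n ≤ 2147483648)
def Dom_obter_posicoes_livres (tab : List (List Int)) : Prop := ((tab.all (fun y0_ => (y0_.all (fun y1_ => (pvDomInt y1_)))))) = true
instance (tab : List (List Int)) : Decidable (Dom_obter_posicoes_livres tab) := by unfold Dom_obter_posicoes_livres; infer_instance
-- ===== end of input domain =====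

-- B replaces A's eh_tabuleiro guard + three forward while loops by a flat all()-based
-- validation and one back-to-front recursion over cell numbers 1..9 (return-value
-- equivalence; both Pythons raise ValueError on invalid boards, excluded by Pre_).
-- ===== PORT A =====
-- eh_tabuleiro's while loop: the chained comparison -1 > v > 1 is kept literally
def ehLoop (x y z : List Int) (i : Nat) : Bool :=
  if i < 3 then
    -- isinstance int / not bool: always true under the Int convention
    if ((-1 > (PySem.List.pyGet? x (i : Int)).getD 0 ∧ (PySem.List.pyGet? x (i : Int)).getD 0 > 1) ∧
        (-1 > (PySem.List.pyGet? y (i : Int)).getD 0 ∧ (PySem.List.pyGet? y (i : Int)).getD 0 > 1) ∧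
        (-1 > (PySem.List.pyGet? z (i : Int)).getD 0 ∧ (PySem.List.pyGet? z (i : Int)).getD 0 > 1)) then
      false
    else ehLoop x y z (i + 1)
  else true
termination_by 3 - i

def eh_tabuleiro (tab : List (List Int)) : Bool :=
  match tab with
  | [x, y, z] =>
    if x.length = 3 ∧ y.length = 3 ∧ z.length = 3 then ehLoop x y z 0 else false
  | _ => false

def loopA1 (x : List Int) (i : Nat) (res : List Int) : List Int :=
  if i ≤ 2 then
    if (PySem.List.pyGet? x (i : Int)).getD 0 = 0 then loopA1 x (i + 1) (res ++ [(i : Int) + 1])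
    else loopA1 x (i + 1) res
  else res
termination_by 3 - i

def loopA2 (y : List Int) (i : Nat) (res : List Int) : List Int :=
  if 3 ≤ i ∧ i ≤ 5 then
    if (PySem.List.pyGet? y ((i : Int) - 3)).getD 0 = 0 then loopA2 y (i + 1) (res ++ [(i : Int) + 1])
    else loopA2 y (i + 1) res
  else res
termination_by 6 - i

def loopA3 (z : List Int) (i : Nat) (res : List Int) : List Int :=
  if 6 ≤ i ∧ i ≤ 8 then
    if (PySem.List.pyGet? z ((i : Int) - 6)).getD 0 = 0 then loopA3 z (i + 1) (res ++ [(i : Int) + 1])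
    else loopA3 z (i + 1) res
  else res
termination_by 9 - i

def obter_posicoes_livres (tab : List (List Int)) : List Int :=
  if eh_tabuleiro tab then
    let x := tab.getD 0 []
    let y := tab.getD 1 []
    let z := tab.getD 2 []
    loopA3 z 6 (loopA2 y 3 (loopA1 x 0 []))
  else []  -- Python raises ValueError here; Pre_ excludes these inputs

-- ===== PORT B =====
-- B's validation: len(tab)==3 and all rows of length 3 (the type checks are vacuous for List Int)
def validaB (tab : List (List Int)) : Bool :=
  tab.length == 3 && tab.all (fun r => r.length == 3)

-- B's back-to-front recursion over cell numbers n = 1..9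
def livresB (tab : List (List Int)) (n : Nat) : List Int :=
  if n > 9 then []
  else
    let rest := livresB tab (n + 1)
    let row := (PySem.List.pyGet? tab (PySem.Int.floordiv ((n : Int) - 1) 3)).getD []
    if (PySem.List.pyGet? row (PySem.Int.mod ((n : Int) - 1) 3)).getD 0 = 0 then
      (n : Int) :: rest
    else rest
termination_by 10 - n

def obter_posicoes_livres_alt (tab : List (List Int)) : List Int :=
  if validaB tab then livresB tab 1
  else []  -- Python raises ValueError here; Pre_ excludes these inputs

-- ===== PRECONDITION & SPEC =====
-- Pre_ excludes exactly the inputs where the validation fails, on which A raises ValueError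
def Pre_obter_posicoes_livres (tab : List (List Int)) : Prop :=
  tab.length = 3 ∧ ∀ r ∈ tab, r.length = 3
instance (tab : List (List Int)) : Decidable (Pre_obter_posicoes_livres tab) := by
  unfold Pre_obter_posicoes_livres; infer_instance
def pvWitness_obter_posicoes_livres : List (List Int) := [[0, 1, 0], [0, 0, -1], [1, 0, 0]]

def Spec_obter_posicoes_livres (tab : List (List Int)) (out : List Int) : Prop := out = obter_posicoes_livres_alt tab
instance (tab : List (List Int)) (out : List Int) : Decidable (Spec_obter_posicoes_livres tab out) := by unfold Spec_obter_posicoes_livres; infer_instance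

-- ===== CLAIM (what is proved, stated in full; the proofs are below) =====
def Claim_equal_obter_posicoes_livres : Prop := ∀ (tab : List (List Int)), Dom_obter_posicoes_livres tab → Pre_obter_posicoes_livres tab → Spec_obter_posicoes_livres tab (obter_posicoes_livres tab)

-- ===== LEMMAS AND PROOFS =====
theorem ehLoop_true (x y z : List Int) (i : Nat) : ehLoop x y z i = true := by
  unfold ehLoop
  split
  · rw [if_neg, ehLoop_true]
    rintro ⟨⟨h1, h2⟩, -⟩; omega
  · rfl
termination_by 3 - i

theorem eh_tabuleiro_true (x y z : List Int) (hx : x.length = 3) (hy : y.length = 3)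
    (hz : z.length = 3) : eh_tabuleiro [x, y, z] = true := by
  unfold eh_tabuleiro
  dsimp only
  rw [if_pos ⟨hx, hy, hz⟩, ehLoop_true]

theorem loopA1_eval (a b c : Int) (res : List Int) :
    loopA1 [a, b, c] 0 res =
      ((res ++ (if a = 0 then [1] else [])) ++ (if b = 0 then [2] else [])) ++
        (if c = 0 then [3] else []) := by
  unfold loopA1; unfold loopA1; unfold loopA1; unfold loopA1
  norm_num [PySem.List.pyGet?, PySem.List.pyIdx?]
  simp only [show Int.toNat 2 = 2 from rfl, List.getElem_cons_succ, List.getElem_cons_zero]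
  split_ifs <;> simp

theorem loopA2_eval (a b c : Int) (res : List Int) :
    loopA2 [a, b, c] 3 res =
      ((res ++ (if a = 0 then [4] else [])) ++ (if b = 0 then [5] else [])) ++
        (if c = 0 then [6] else []) := by
  unfold loopA2; unfold loopA2; unfold loopA2; unfold loopA2
  norm_num [PySem.List.pyGet?, PySem.List.pyIdx?]
  simp only [show Int.toNat 2 = 2 from rfl,
    List.getElem_cons_succ, List.getElem_cons_zero]
  split_ifs <;> simp

theorem loopA3_eval (a b c : Int) (res : List Int) :
    loopA3 [a, b, c] 6 res =
      ((res ++ (if a = 0 then [7] else [])) ++ (if b = 0 then [8] else [])) ++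
        (if c = 0 then [9] else []) := by
  unfold loopA3; unfold loopA3; unfold loopA3; unfold loopA3
  norm_num [PySem.List.pyGet?, PySem.List.pyIdx?]
  simp only [show Int.toNat 2 = 2 from rfl,
    List.getElem_cons_succ, List.getElem_cons_zero]
  split_ifs <;> simp

theorem livresB_step (tab : List (List Int)) (n : Nat) (h : n ≤ 9) (v : Int)
    (hv : (PySem.List.pyGet? ((PySem.List.pyGet? tab (PySem.Int.floordiv ((n : Int) - 1) 3)).getD [])
            (PySem.Int.mod ((n : Int) - 1) 3)).getD 0 = v) :
    livresB tab n = (if v = 0 then [(n : Int)] else []) ++ livresB tab (n + 1) := by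
  rw [livresB, if_neg (by omega)]
  dsimp only
  rw [hv]
  by_cases hc : v = 0
  · rw [if_pos hc, if_pos hc]; rfl
  · rw [if_neg hc, if_neg hc]; rw [List.nil_append]

theorem livresB_eval (a1 a2 a3 b1 b2 b3 c1 c2 c3 : Int) :
    livresB [[a1, a2, a3], [b1, b2, b3], [c1, c2, c3]] 1 =
      (if a1 = 0 then [(1 : Int)] else []) ++ (if a2 = 0 then [2] else []) ++
      (if a3 = 0 then [3] else []) ++ (if b1 = 0 then [4] else []) ++
      (if b2 = 0 then [5] else []) ++ (if b3 = 0 then [6] else []) ++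
      (if c1 = 0 then [7] else []) ++ (if c2 = 0 then [8] else []) ++
      (if c3 = 0 then [9] else []) := by
  rw [livresB_step _ 1 (by omega) a1 rfl, livresB_step _ 2 (by omega) a2 rfl,
    livresB_step _ 3 (by omega) a3 rfl, livresB_step _ 4 (by omega) b1 rfl,
    livresB_step _ 5 (by omega) b2 rfl, livresB_step _ 6 (by omega) b3 rfl,
    livresB_step _ 7 (by omega) c1 rfl, livresB_step _ 8 (by omega) c2 rfl,
    livresB_step _ 9 (by omega) c3 rfl,
    show livresB [[a1, a2, a3], [b1, b2, b3], [c1, c2, c3]] 10 = [] from by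
      rw [livresB, if_pos (by omega)]]
  push_cast
  simp only [List.append_assoc, List.append_nil]

theorem main_eq (tab : List (List Int)) (h : Pre_obter_posicoes_livres tab) :
    obter_posicoes_livres tab = obter_posicoes_livres_alt tab := by
  obtain ⟨hlen, hrow⟩ := h
  match tab with
  | [x, y, z] =>
    have hx := hrow x (by simp); have hy := hrow y (by simp); have hz := hrow z (by simp)
    match x, hx, y, hy, z, hz with
    | [a1, a2, a3], _, [b1, b2, b3], _, [c1, c2, c3], _ =>
      rw [obter_posicoes_livres, obter_posicoes_livres_alt,
        if_pos (eh_tabuleiro_true _ _ _ (by rfl) (by rfl) (by rfl)),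
        if_pos (show validaB [[a1, a2, a3], [b1, b2, b3], [c1, c2, c3]] = true by rfl)]
      simp only [List.getD, List.getElem?_cons_zero, List.getElem?_cons_succ, Option.getD_some]
      rw [loopA1_eval, loopA2_eval, loopA3_eval, livresB_eval]
      simp only [List.append_assoc, List.nil_append]

-- ===== VERDICT (by name: the statement is the Claim_ definition above) =====
theorem obter_posicoes_livres_spec : Claim_equal_obter_posicoes_livres := by
  intro tab _ hpre
  exact main_eq tab hpre
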